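-- pv_equiv track=rewrite | github.com/ShayGeko/competitive_programming | codesprint/midcard.py | seg_func
-- ===== SOURCE A (Python) =====
-- def seg_func(ar,br,m=1000000007):
--     na,nb = len(ar),len(br)
--     cr = [0]*min((na+nb-1),101)
--     n = len(cr)
--     for a in range(na):
--         for b in range(min(nb,n-a)):
--             cr[a+b] += ar[a]*br[b]
--     for c in range(n):
--         cr[c] = cr[c] % m
--     return cr
-- ===== SOURCE B (Python) =====
-- def seg_func(ar, br, m=1000000007):
--     na, nb = len(ar), len(br)
--     n = min(na + nb - 1, 101)
--     out = []
--     for c in range(n):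
--         lo = max(0, c - nb + 1)
--         hi = min(na - 1, c) + 1
--         out.append(sum(ar[a] * br[c - a] for a in range(lo, hi)) % m)
--     return out
-- ===== Notes on version B (the rewrite author's own statement) =====
-- stated objective: alternative
-- what changed: Replaces A's scatter-add (nested loops over input index pairs accumulating into a preallocated buffer, then a separate mod pass) by an output-indexed gather that computes each of the min(na+nb-1,101) coefficients exactly once as a single bounded sum already reduced mod m.
import Mathlib
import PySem

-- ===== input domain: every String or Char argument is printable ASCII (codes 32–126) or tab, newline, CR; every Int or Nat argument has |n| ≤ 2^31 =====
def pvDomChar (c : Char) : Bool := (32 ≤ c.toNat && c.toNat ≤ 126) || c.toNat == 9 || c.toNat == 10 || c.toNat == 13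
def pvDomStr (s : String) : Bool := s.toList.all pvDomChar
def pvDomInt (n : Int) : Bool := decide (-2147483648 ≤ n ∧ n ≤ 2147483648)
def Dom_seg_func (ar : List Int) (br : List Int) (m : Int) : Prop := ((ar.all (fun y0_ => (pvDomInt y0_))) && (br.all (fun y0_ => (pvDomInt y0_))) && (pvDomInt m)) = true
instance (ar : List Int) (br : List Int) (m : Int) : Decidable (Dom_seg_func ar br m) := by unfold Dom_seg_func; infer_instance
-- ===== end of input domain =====

-- B gathers each truncated output coefficient once by explicit index arithmetic instead of
-- A's scatter-add into a buffer followed by a separate mod pass (objective: alternative).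

-- ===== PORT A =====
-- inner loop: for b in range(min(nb, n-a)): cr[a+b] += ar[a]*br[b]
def segInnerA (ar br : List Int) (a k : Nat) (cr : List Int) : List Int :=
  (List.range k).foldl
    (fun cr b => cr.set (a + b) (cr.getD (a + b) 0 + ar.getD a 0 * br.getD b 0)) cr
-- final pass: for c in range(n): cr[c] = cr[c] % m
def segModA (m : Int) (k : Nat) (cr : List Int) : List Int :=
  (List.range k).foldl (fun l c => l.set c (PySem.Int.mod (l.getD c 0) m)) cr
def seg_func (ar : List Int) (br : List Int) (m : Int) : List Int :=
  let na := ar.length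
  let nb := br.length
  let cr : List Int := List.replicate (min (na + nb - 1) 101) 0
  let n := cr.length
  let cr := (List.range na).foldl (fun cr a => segInnerA ar br a (min nb (n - a)) cr) cr
  segModA m n cr

-- ===== PORT B =====
-- one gathered cell: (sum of ar[a]*br[c-a] for a in range(max(0,c-nb+1), min(na-1,c)+1)) % m
def segCellB (ar br : List Int) (m : Int) (c : Nat) : Int :=
  -- lo = max(0, c - nb + 1), hi = min(na - 1, c) + 1, both Int as in Python
  PySem.Int.mod
    (((List.range' (max 0 ((c : Int) - (br.length : Int) + 1)).toNat
        ((min ((ar.length : Int) - 1) (c : Int) + 1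
          - max 0 ((c : Int) - (br.length : Int) + 1)).toNat)).map
        (fun a => ar.getD a 0 * br.getD (c - a) 0)).sum) m
def seg_func_alt (ar : List Int) (br : List Int) (m : Int) : List Int :=
  (List.range (min (ar.length + br.length - 1) 101)).map (segCellB ar br m)

-- ===== PRECONDITION & SPEC =====
-- Pre_ excludes only the inputs where Python A raises ZeroDivisionError: m = 0 together with
-- a non-empty output buffer (na + nb ≥ 2); B raises there as well.
def Pre_seg_func (ar : List Int) (br : List Int) (m : Int) : Prop :=
  m ≠ 0 ∨ ar.length + br.length < 2
instance (ar : List Int) (br : List Int) (m : Int) : Decidable (Pre_seg_func ar br m) := by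
  unfold Pre_seg_func; infer_instance
def pvWitness_seg_func : List Int × List Int × Int := ([1, 2, 3], [4, 5], 7)
def Spec_seg_func (ar : List Int) (br : List Int) (m : Int) (out : List Int) : Prop := out = seg_func_alt ar br m
instance (ar : List Int) (br : List Int) (m : Int) (out : List Int) : Decidable (Spec_seg_func ar br m out) := by unfold Spec_seg_func; infer_instance

-- ===== CLAIM (what is proved, stated in full; the proofs are below) =====
def Claim_equal_seg_func : Prop := ∀ (ar : List Int) (br : List Int) (m : Int), Dom_seg_func ar br m → Pre_seg_func ar br m → Spec_seg_func ar br m (seg_func ar br m)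

-- ===== LEMMAS AND PROOFS =====

-- the canonical coefficient: sum over all a ≤ j of ar[a]*br[j-a], out-of-range reads giving 0
def segCoef (ar br : List Int) (j : Nat) : Int :=
  ∑ a ∈ Finset.range (j + 1), ar.getD a 0 * br.getD (j - a) 0

theorem getD_set_ne (l : List Int) (i j : Nat) (v : Int) (h : i ≠ j) :
    (l.set i v).getD j 0 = l.getD j 0 := by
  simp [List.getD_eq_getElem?_getD, List.getElem?_set_ne h]

theorem getD_set_self (l : List Int) (j : Nat) (v : Int) (h : j < l.length) :
    (l.set j v).getD j 0 = v := by
  simp [List.getD_eq_getElem?_getD, h]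

-- bridge: list-range sum = Finset.range sum
theorem sum_map_range (k : Nat) (f : Nat → Int) :
    ((List.range k).map f).sum = ∑ a ∈ Finset.range k, f a := by
  induction k with
  | zero => simp
  | succ k ih => rw [List.range_succ]; simp [Finset.sum_range_succ, ih]

-- bridge: list-range' sum = Finset.Ico sum
theorem sum_map_range' (s k : Nat) (f : Nat → Int) :
    ((List.range' s k).map f).sum = ∑ a ∈ Finset.Ico s (s + k), f a := by
  rw [List.range'_eq_map_range, List.map_map, sum_map_range, Finset.sum_Ico_eq_sum_range]
  simp [Function.comp]

theorem segInnerA_length (ar br : List Int) (a k : Nat) (cr : List Int) :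
    (segInnerA ar br a k cr).length = cr.length := by
  induction k generalizing cr with
  | zero => simp [segInnerA]
  | succ k ih =>
      unfold segInnerA at *
      rw [List.range_succ, List.foldl_append]
      simp only [List.foldl_cons, List.foldl_nil, List.length_set]
      exact ih cr

theorem segInnerA_getD (ar br : List Int) (a k : Nat) (cr : List Int) (j : Nat)
    (hj : j < cr.length) :
    (segInnerA ar br a k cr).getD j 0 =
      cr.getD j 0 + (if a ≤ j ∧ j - a < k then ar.getD a 0 * br.getD (j - a) 0 else 0) := by
  induction k generalizing cr with
  | zero => simp [segInnerA]
  | succ k ih =>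
      unfold segInnerA at *
      rw [List.range_succ, List.foldl_append]
      simp only [List.foldl_cons, List.foldl_nil]
      by_cases he : a + k = j
      · have hcond : ¬ (a ≤ j ∧ j - a < k) := by omega
        have hcond' : a ≤ j ∧ j - a < k + 1 := by omega
        have hlen : j < (List.foldl (fun cr b => cr.set (a + b) (cr.getD (a + b) 0 + ar.getD a 0 * br.getD b 0)) cr (List.range k)).length := by
          have := segInnerA_length ar br a k cr; unfold segInnerA at this; omega
        rw [he, getD_set_self _ _ _ hlen, ih cr hj]
        have hja : j - a = k := by omega
        rw [if_neg hcond, if_pos hcond', hja]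
        ring
      · rw [getD_set_ne _ _ _ _ he, ih cr hj]
        have hiff : (a ≤ j ∧ j - a < k + 1) ↔ (a ≤ j ∧ j - a < k) := by omega
        simp only [hiff]

theorem segScatter_length (ar br : List Int) (N : Nat) (n : Nat) (cr : List Int) :
    ((List.range N).foldl (fun cr a => segInnerA ar br a (min br.length (n - a)) cr) cr).length
      = cr.length := by
  induction N generalizing cr with
  | zero => simp
  | succ N ih =>
      rw [List.range_succ, List.foldl_append]
      simp only [List.foldl_cons, List.foldl_nil]
      rw [segInnerA_length]
      exact ih cr

theorem segScatter_getD (ar br : List Int) (N : Nat) (n : Nat) (cr : List Int) (j : Nat)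
    (hj : j < cr.length) :
    ((List.range N).foldl (fun cr a => segInnerA ar br a (min br.length (n - a)) cr) cr).getD j 0
      = cr.getD j 0 +
        ∑ a ∈ Finset.range N,
          (if a ≤ j ∧ j - a < min br.length (n - a) then ar.getD a 0 * br.getD (j - a) 0 else 0) := by
  induction N generalizing cr with
  | zero => simp
  | succ N ih =>
      rw [List.range_succ, List.foldl_append]
      simp only [List.foldl_cons, List.foldl_nil]
      have hlen : j < ((List.range N).foldl (fun cr a => segInnerA ar br a (min br.length (n - a)) cr) cr).length := by
        rw [segScatter_length]; exact hj
      rw [segInnerA_getD _ _ _ _ _ _ hlen, ih cr hj, Finset.sum_range_succ]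
      ring

theorem segModA_length (m : Int) (k : Nat) (cr : List Int) :
    (segModA m k cr).length = cr.length := by
  induction k generalizing cr with
  | zero => simp [segModA]
  | succ k ih =>
      unfold segModA at *
      rw [List.range_succ, List.foldl_append]
      simp only [List.foldl_cons, List.foldl_nil, List.length_set]
      exact ih cr

theorem segModA_getD_ge (m : Int) (k : Nat) (cr : List Int) (j : Nat) (h : k ≤ j) :
    (segModA m k cr).getD j 0 = cr.getD j 0 := by
  induction k generalizing cr with
  | zero => simp [segModA]
  | succ k ih =>
      unfold segModA at *
      rw [List.range_succ, List.foldl_append]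
      simp only [List.foldl_cons, List.foldl_nil]
      rw [getD_set_ne _ _ _ _ (by omega), ih cr (by omega)]

theorem segModA_getD (m : Int) (k : Nat) (cr : List Int) (j : Nat) (hj : j < k)
    (hjl : j < cr.length) :
    (segModA m k cr).getD j 0 = PySem.Int.mod (cr.getD j 0) m := by
  induction k generalizing cr with
  | zero => omega
  | succ k ih =>
      unfold segModA at *
      rw [List.range_succ, List.foldl_append]
      simp only [List.foldl_cons, List.foldl_nil]
      by_cases he : j < k
      · rw [getD_set_ne _ _ _ _ (by omega), ih cr he hjl]
      · have hkj : k = j := by omega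
        rw [hkj]
        have hlen : j < (List.foldl (fun l c => l.set c (PySem.Int.mod (l.getD c 0) m)) cr (List.range j)).length := by
          have := segModA_length m j cr; unfold segModA at this; omega
        rw [getD_set_self _ _ _ hlen]
        refine congrArg (fun z => PySem.Int.mod z m) ?_
        have h2 := segModA_getD_ge m j cr j (le_refl j)
        unfold segModA at h2
        exact h2

-- A's scattered (pre-mod) value at j equals the canonical coefficient, for j < n
theorem scatter_eq_coef (ar br : List Int) (n j : Nat)
    (hn : n ≤ ar.length + br.length - 1) (hj : j < n) :
    (∑ a ∈ Finset.range ar.length,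
        (if a ≤ j ∧ j - a < min br.length (n - a) then ar.getD a 0 * br.getD (j - a) 0 else 0))
      = segCoef ar br j := by
  have hstep : ∀ a, a ∈ Finset.range ar.length →
      (if a ≤ j ∧ j - a < min br.length (n - a) then ar.getD a 0 * br.getD (j - a) 0 else 0)
        = (if a ≤ j then ar.getD a 0 * br.getD (j - a) 0 else 0) := by
    intro a _
    by_cases ha : a ≤ j
    · by_cases hb : j - a < min br.length (n - a)
      · rw [if_pos ⟨ha, hb⟩, if_pos ha]
      · have hbr : br.length ≤ j - a := by omega
        rw [if_neg (by tauto), if_pos ha, List.getD_eq_default _ _ hbr, mul_zero]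
    · rw [if_neg (by tauto), if_neg ha]
  rw [Finset.sum_congr rfl hstep]
  have hbig : (∑ a ∈ Finset.range ar.length, (if a ≤ j then ar.getD a 0 * br.getD (j - a) 0 else 0))
      = ∑ a ∈ Finset.range (ar.length + j + 1), (if a ≤ j then ar.getD a 0 * br.getD (j - a) 0 else 0) := by
    apply Finset.sum_subset (by intro x hx; simp at hx ⊢; omega)
    intro x _ hx
    simp only [Finset.mem_range, not_lt] at hx
    by_cases hxj : x ≤ j
    · rw [if_pos hxj, List.getD_eq_default _ _ hx, zero_mul]
    · rw [if_neg hxj]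
  rw [hbig]
  have h1 : (∑ a ∈ Finset.range (ar.length + j + 1), (if a ≤ j then ar.getD a 0 * br.getD (j - a) 0 else 0))
      = ∑ a ∈ Finset.range (j + 1), (if a ≤ j then ar.getD a 0 * br.getD (j - a) 0 else 0) := by
    symm
    apply Finset.sum_subset (by intro x hx; simp at hx ⊢; omega)
    intro x _ hx'
    simp only [Finset.mem_range, not_lt] at hx'
    rw [if_neg (by omega)]
  rw [h1]
  unfold segCoef
  apply Finset.sum_congr rfl
  intro x hx
  simp only [Finset.mem_range] at hx
  rw [if_pos (by omega)]

-- B's gathered cell equals mod of the canonical coefficient, for j < n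
theorem cell_eq_coef (ar br : List Int) (m : Int) (n j : Nat)
    (hn : n ≤ ar.length + br.length - 1) (hn1 : 1 ≤ ar.length + br.length) (hj : j < n) :
    segCellB ar br m j = PySem.Int.mod (segCoef ar br j) m := by
  unfold segCellB
  refine congrArg (fun z => PySem.Int.mod z m) ?_
  set lo : Int := max 0 ((j : Int) - (br.length : Int) + 1) with hlo
  set hi : Int := min ((ar.length : Int) - 1) (j : Int) + 1 with hhi
  have hj' : (j : Int) < (n : Int) := by exact_mod_cast hj
  have hn' : (n : Int) ≤ (ar.length : Int) + (br.length : Int) - 1 := by omega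
  have hlo0 : 0 ≤ lo := by rw [hlo]; omega
  have hlohi : lo ≤ hi := by rw [hlo, hhi]; omega
  have hhij : hi ≤ (j : Int) + 1 := by rw [hhi]; omega
  rw [sum_map_range']
  have hH : lo.toNat + (hi - lo).toNat = hi.toNat := by omega
  rw [hH]
  unfold segCoef
  apply Finset.sum_subset
  · intro x hx
    simp only [Finset.mem_Ico] at hx
    simp only [Finset.mem_range]
    omega
  · intro x hx hx'
    simp only [Finset.mem_range] at hx
    simp only [Finset.mem_Ico, not_and, not_le, not_lt] at hx'
    by_cases hc : x < lo.toNat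
    · have hbr : br.length ≤ j - x := by rw [hlo] at hc; omega
      rw [List.getD_eq_default _ _ hbr, mul_zero]
    · have hx2 : hi.toNat ≤ x := by
        rcases Nat.lt_or_ge x hi.toNat with h | h
        · exact absurd (hx' (by omega)) (by omega)
        · exact h
      have har : ar.length ≤ x := by rw [hhi] at hx2; omega
      rw [List.getD_eq_default _ _ har, zero_mul]

theorem seg_func_eq (ar br : List Int) (m : Int) :
    seg_func ar br m = seg_func_alt ar br m := by
  simp only [seg_func, seg_func_alt, List.length_replicate]
  set n := min (ar.length + br.length - 1) 101 with hn
  have hnle : n ≤ ar.length + br.length - 1 := by omega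
  apply List.ext_getElem
  · rw [segModA_length, segScatter_length, List.length_replicate, List.length_map,
      List.length_range]
  · intro j hj1 hj2
    have hjn : j < n := by simpa using hj2
    have hsc : j < ((List.range ar.length).foldl
        (fun cr a => segInnerA ar br a (min br.length (n - a)) cr)
        (List.replicate n (0 : Int))).length := by
      rw [segScatter_length, List.length_replicate]; exact hjn
    have hget : ∀ (l : List Int) (h : j < l.length), l[j]'h = l.getD j 0 := by
      intro l h
      simp [List.getD_eq_getElem?_getD, List.getElem?_eq_getElem h]
    rw [hget _ hj1, hget _ hj2]
    rw [segModA_getD m n _ j hjn hsc,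
      segScatter_getD ar br ar.length n _ j (by simp [hjn])]
    have h0 : (List.replicate n (0 : Int)).getD j 0 = 0 := by
      simp [List.getD_eq_getElem?_getD, List.getElem?_replicate, hjn]
    rw [h0, zero_add, scatter_eq_coef ar br n j hnle hjn]
    have hn1 : 1 ≤ ar.length + br.length := by omega
    have hRHS : (List.map (segCellB ar br m) (List.range n)).getD j 0 = segCellB ar br m j := by
      rw [List.getD_eq_getElem?_getD, List.getElem?_map]
      simp [List.getElem?_range, hjn]
    rw [hRHS]
    exact (cell_eq_coef ar br m n j hnle hn1 hjn).symm

-- ===== VERDICT (by name: the statement is the Claim_ definition above) =====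
theorem seg_func_spec : Claim_equal_seg_func := by
  intro ar br m _ _
  unfold Spec_seg_func
  exact seg_func_eq ar br m
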